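-- pv_equiv track=rewrite | github.com/delaanthonio/hackerrank | algorithm/bit_manipulation/bob_and_subarray/solution.py | subarray_or_sum
-- ===== SOURCE A (Python) =====
-- from typing import List
--
-- def subarray_or_sum(arr: List[int]) -> int:
--     s = 0
--     vals = []
--     for x in arr:
--         for i, val in enumerate(vals):
--             vals[i] |= x
--         vals.append(x)
--         s += sum(vals)
--     return s
-- ===== SOURCE B (Python) =====
-- from typing import List
--
-- def subarray_or_sum(arr: List[int]) -> int:
--     s = 0
--     cur = {}  # OR value of a subarray ending at the current index -> number of such subarrays
--     for x in arr:
--         nxt = {}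
--         nxt[x] = nxt.get(x, 0) + 1
--         for v, c in cur.items():
--             w = v | x
--             nxt[w] = nxt.get(w, 0) + c
--         s += sum(v * c for v, c in nxt.items())
--         cur = nxt
--     return s
-- ===== Notes on version B (the rewrite author's own statement) =====
-- stated objective: faster
-- what changed: Instead of keeping every suffix-OR in a list and re-OR-ing all of them at each step (O(n^2)), B keeps only the distinct suffix-OR values with their multiplicities in a dict; since ORs ending at an index take only O(bit-width) distinct values, each step is O(log maxval).
import Mathlib
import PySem

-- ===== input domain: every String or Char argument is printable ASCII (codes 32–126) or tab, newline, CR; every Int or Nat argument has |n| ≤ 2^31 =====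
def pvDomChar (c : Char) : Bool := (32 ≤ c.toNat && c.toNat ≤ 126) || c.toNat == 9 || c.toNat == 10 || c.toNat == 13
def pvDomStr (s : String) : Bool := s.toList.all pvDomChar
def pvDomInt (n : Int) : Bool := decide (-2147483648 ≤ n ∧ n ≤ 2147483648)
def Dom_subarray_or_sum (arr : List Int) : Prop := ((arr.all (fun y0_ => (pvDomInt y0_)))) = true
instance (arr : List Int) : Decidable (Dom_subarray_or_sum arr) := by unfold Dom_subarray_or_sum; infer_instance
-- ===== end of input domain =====

-- B replaces A's list of ALL suffix-ORs by a dict of the DISTINCT suffix-OR values with multiplicities (measured faster; same return value).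

-- ===== PORT A =====
-- for x in arr: vals[i] |= x for each i; vals.append(x); s += sum(vals)
def subarray_or_sum (arr : List Int) : Int :=
  (arr.foldl (fun (st : Int × List Int) x =>
    let vals := st.2.map (fun v => PySem.Int.bor v x) ++ [x]
    (st.1 + vals.sum, vals)) (0, ([] : List Int))).1

-- ===== PORT B =====
-- one step of B's outer loop: nxt = {}; nxt[x] = nxt.get(x,0)+1; for (v,c) in cur.items(): nxt[v|x] += c
def altStep (cur : PySem.Dict Int Int) (x : Int) : PySem.Dict Int Int :=
  cur.items.foldl
    (fun d vc => d.insert (PySem.Int.bor vc.1 x) (d.getD (PySem.Int.bor vc.1 x) 0 + vc.2))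
    ((PySem.Dict.empty).insert x ((PySem.Dict.empty : PySem.Dict Int Int).getD x 0 + 1))

def subarray_or_sum_alt (arr : List Int) : Int :=
  (arr.foldl (fun (st : Int × PySem.Dict Int Int) x =>
    let nxt := altStep st.2 x
    (st.1 + (nxt.items.map (fun vc => vc.1 * vc.2)).sum, nxt)) (0, PySem.Dict.empty)).1

-- ===== PRECONDITION & SPEC =====
def Spec_subarray_or_sum (arr : List Int) (out : Int) : Prop := out = subarray_or_sum_alt arr
instance (arr : List Int) (out : Int) : Decidable (Spec_subarray_or_sum arr out) := by unfold Spec_subarray_or_sum; infer_instance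

-- ===== CLAIM (what is proved, stated in full; the proofs are below) =====
def Claim_equal_subarray_or_sum : Prop := ∀ (arr : List Int), Dom_subarray_or_sum arr → Spec_subarray_or_sum arr (subarray_or_sum arr)


-- ===== LEMMAS AND PROOFS =====

-- expansion of a count dict into the multiset (as a list) it represents
def expd (d : PySem.Dict Int Int) : List Int :=
  d.items.flatMap (fun p => List.replicate p.2.toNat p.1)

-- invariant tying B's dict to A's list of suffix ORs
def DInv (vals : List Int) (d : PySem.Dict Int Int) : Prop :=
  d.keys.Nodup ∧ (∀ p ∈ d.items, 0 ≤ p.2) ∧ (expd d).Perm vals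

lemma count_flatMap_rep (l : List (Int × Int)) (v : Int) :
    (l.flatMap (fun p => List.replicate p.2.toNat p.1)).count v
      = ((l.filter (fun p => p.1 == v)).map (fun p => p.2.toNat)).sum := by
  induction l with
  | nil => simp
  | cons p t ih => by_cases h : p.1 = v <;> simp [List.count_append, List.count_replicate, h, ih]

lemma filter_key_nil (l : List (Int × Int)) (v : Int) (h : v ∉ l.map (·.1)) :
    l.filter (fun p => p.1 == v) = [] := by
  rw [List.filter_eq_nil_iff]
  intro p hp hb
  exact h (List.mem_map.mpr ⟨p, hp, by simpa using hb⟩)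

lemma filter_key_singleton (l : List (Int × Int)) (hnd : (l.map (·.1)).Nodup)
    (v c : Int) (h : (v, c) ∈ l) : l.filter (fun p => p.1 == v) = [(v, c)] := by
  induction l with
  | nil => simp at h
  | cons p t ih =>
    simp only [List.map_cons, List.nodup_cons] at hnd
    rcases List.mem_cons.mp h with h | h
    · subst h
      simp only [List.filter_cons, BEq.rfl, if_pos]
      rw [filter_key_nil t v hnd.1]
    · have hpv : p.1 ≠ v := by
        intro hpv
        exact hnd.1 (hpv ▸ List.mem_map.mpr ⟨(v, c), h, rfl⟩)
      simp only [List.filter_cons, show (p.1 == v) = false by simpa using hpv]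
      exact ih hnd.2 h

lemma getD_nonneg (d : PySem.Dict Int Int) (hpos : ∀ p ∈ d.items, 0 ≤ p.2) (v : Int) :
    0 ≤ d.getD v 0 := by
  rcases h : d.get? v with _ | c
  · rw [PySem.Dict.getD_of_get?_eq_none d 0 h]
  · rw [PySem.Dict.getD_of_get?_eq_some d 0 h]
    exact hpos _ (PySem.Dict.mem_items_of_get?_eq_some d h)

lemma count_expd (d : PySem.Dict Int Int) (hnd : d.keys.Nodup) (v : Int) :
    (expd d).count v = (d.getD v 0).toNat := by
  unfold expd
  rw [count_flatMap_rep]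
  rcases h : d.get? v with _ | c
  · rw [PySem.Dict.getD_of_get?_eq_none d 0 h]
    rw [filter_key_nil d.items v ((PySem.Dict.get?_eq_none_iff_not_mem_keys d v).mp h)]
    simp
  · rw [PySem.Dict.getD_of_get?_eq_some d 0 h]
    rw [filter_key_singleton d.items hnd v c (PySem.Dict.mem_items_of_get?_eq_some d h)]
    simp

lemma expd_insert_add (d : PySem.Dict Int Int) (hnd : d.keys.Nodup)
    (hpos : ∀ p ∈ d.items, 0 ≤ p.2) (w c : Int) (hc : 0 ≤ c) :
    (expd (d.insert w (d.getD w 0 + c))).Perm (expd d ++ List.replicate c.toNat w) := by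
  rw [List.perm_iff_count]
  intro u
  have hnd' : (d.insert w (d.getD w 0 + c)).keys.Nodup :=
    PySem.Dict.nodup_keys_insert d w _ hnd
  rw [count_expd _ hnd' u, List.count_append, count_expd _ hnd u, List.count_replicate,
    PySem.Dict.getD_insert]
  have hw := getD_nonneg d hpos w
  have hu := getD_nonneg d hpos u
  by_cases h : u = w <;> simp [h] <;> omega

lemma inner_fold (x : Int) (l : List (Int × Int)) :
    ∀ (d : PySem.Dict Int Int), d.keys.Nodup → (∀ p ∈ d.items, 0 ≤ p.2) →
    (∀ p ∈ l, 0 ≤ p.2) →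
    let r := l.foldl (fun d vc =>
      d.insert (PySem.Int.bor vc.1 x) (d.getD (PySem.Int.bor vc.1 x) 0 + vc.2)) d
    r.keys.Nodup ∧ (∀ p ∈ r.items, 0 ≤ p.2) ∧
      (expd r).Perm (expd d ++ l.flatMap (fun vc => List.replicate vc.2.toNat (PySem.Int.bor vc.1 x))) := by
  induction l with
  | nil => intro d hnd hpos _; exact ⟨hnd, hpos, by simp⟩
  | cons vc t ih =>
    intro d hnd hpos hl
    simp only [List.foldl_cons]
    have hc : 0 ≤ vc.2 := hl vc (by simp)
    have hnd' : (d.insert (PySem.Int.bor vc.1 x) (d.getD (PySem.Int.bor vc.1 x) 0 + vc.2)).keys.Nodup :=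
      PySem.Dict.nodup_keys_insert d _ _ hnd
    have hpos' : ∀ p ∈ (d.insert (PySem.Int.bor vc.1 x) (d.getD (PySem.Int.bor vc.1 x) 0 + vc.2)).items, 0 ≤ p.2 := by
      intro p hp
      rcases (PySem.Dict.mem_items_insert d _ _ p).mp hp with h | ⟨h, _⟩
      · subst h; exact add_nonneg (getD_nonneg d hpos _) hc
      · exact hpos p h
    obtain ⟨h1, h2, h3⟩ := ih _ hnd' hpos' (fun p hp => hl p (by simp [hp]))
    refine ⟨h1, h2, h3.trans ?_⟩
    have hstep := (expd_insert_add d hnd hpos (PySem.Int.bor vc.1 x) vc.2 hc).append_right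
      (t.flatMap (fun vc => List.replicate vc.2.toNat (PySem.Int.bor vc.1 x)))
    refine hstep.trans ?_
    simp [List.append_assoc]

lemma expd_base (x : Int) :
    expd ((PySem.Dict.empty).insert x ((PySem.Dict.empty : PySem.Dict Int Int).getD x 0 + 1)) = [x] := by
  rw [expd, PySem.Dict.items_insert_of_not_contains PySem.Dict.empty _ (PySem.Dict.contains_empty x)]
  rw [PySem.Dict.getD_empty]
  rfl

lemma altStep_inv (vals : List Int) (d : PySem.Dict Int Int) (x : Int) (h : DInv vals d) :
    DInv (vals.map (fun v => PySem.Int.bor v x) ++ [x]) (altStep d x) := by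
  obtain ⟨hnd, hpos, hperm⟩ := h
  have hnde : ((PySem.Dict.empty).insert x ((PySem.Dict.empty : PySem.Dict Int Int).getD x 0 + 1)).keys.Nodup :=
    PySem.Dict.nodup_keys_insert _ _ _ (by rw [PySem.Dict.keys_empty]; exact List.nodup_nil)
  have hpose : ∀ p ∈ ((PySem.Dict.empty).insert x ((PySem.Dict.empty : PySem.Dict Int Int).getD x 0 + 1)).items, 0 ≤ p.2 := by
    intro p hp
    rcases (PySem.Dict.mem_items_insert _ _ _ p).mp hp with h | ⟨h, _⟩
    · subst h; rw [PySem.Dict.getD_empty]; norm_num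
    · simp [PySem.Dict.empty] at h
  obtain ⟨h1, h2, h3⟩ := inner_fold x d.items _ hnde hpose hpos
  refine ⟨h1, h2, h3.trans ?_⟩
  rw [expd_base]
  have hmap : d.items.flatMap (fun vc => List.replicate vc.2.toNat (PySem.Int.bor vc.1 x))
      = (expd d).map (fun v => PySem.Int.bor v x) := by
    simp [expd, List.map_flatMap]
  rw [hmap]
  exact List.perm_append_comm.trans (((hperm.map _).append_right _))

lemma weighted_sum_list (l : List (Int × Int)) (hpos : ∀ p ∈ l, 0 ≤ p.2) :
    (l.map (fun vc => vc.1 * vc.2)).sum = (l.flatMap (fun p => List.replicate p.2.toNat p.1)).sum := by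
  induction l with
  | nil => simp
  | cons p t ih =>
    have hp : 0 ≤ p.2 := hpos p (by simp)
    simp only [List.map_cons, List.sum_cons, List.flatMap_cons, List.sum_append,
      List.sum_replicate, nsmul_eq_mul]
    rw [ih (fun q hq => hpos q (by simp [hq])), Int.toNat_of_nonneg hp]
    ring

lemma weighted_sum_eq (d : PySem.Dict Int Int) (hpos : ∀ p ∈ d.items, 0 ≤ p.2) :
    (d.items.map (fun vc => vc.1 * vc.2)).sum = (expd d).sum :=
  weighted_sum_list d.items hpos

lemma main_fold (arr : List Int) :
    ∀ (s : Int) (vals : List Int) (d : PySem.Dict Int Int), DInv vals d →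
    (arr.foldl (fun (st : Int × List Int) x =>
      let vals := st.2.map (fun v => PySem.Int.bor v x) ++ [x]
      (st.1 + vals.sum, vals)) (s, vals)).1
    = (arr.foldl (fun (st : Int × PySem.Dict Int Int) x =>
      let nxt := altStep st.2 x
      (st.1 + (nxt.items.map (fun vc => vc.1 * vc.2)).sum, nxt)) (s, d)).1 := by
  induction arr with
  | nil => intro s vals d _; rfl
  | cons x t ih =>
    intro s vals d h
    simp only [List.foldl_cons]
    have h' := altStep_inv vals d x h
    have hsum : (vals.map (fun v => PySem.Int.bor v x) ++ [x]).sum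
        = ((altStep d x).items.map (fun vc => vc.1 * vc.2)).sum := by
      rw [weighted_sum_eq _ h'.2.1, h'.2.2.sum_eq]
    rw [← hsum]
    exact ih _ _ _ h'

-- ===== VERDICT (by name: the statement is the Claim_ definition above) =====
theorem subarray_or_sum_spec : Claim_equal_subarray_or_sum := by
  intro arr _
  unfold Spec_subarray_or_sum subarray_or_sum subarray_or_sum_alt
  exact main_fold arr 0 [] PySem.Dict.empty
    ⟨by rw [PySem.Dict.keys_empty]; exact List.nodup_nil,
     by intro p hp; simp [PySem.Dict.empty] at hp,
     by rfl⟩
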